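-- pv_equiv track=rewrite | github.com/vosbek/docxp | backend/app/services/ai_service.py | _analyze_architectural_patterns
-- ===== SOURCE A (Python) =====
-- from typing import List, Dict, Any, Optional
--
-- def _analyze_architectural_patterns(entities: List[Dict]) -> str:
--     """Analyze entities for architectural patterns and insights"""
--     if not entities:
--         return "No entities available for architectural analysis."
--
--     from collections import Counter, defaultdict
--
--     # Analyze file organization patterns
--     file_paths = [e.get('file_path', '') for e in entities if e.get('file_path')]
--     directory_structure = defaultdict(int)
--
--     for path in file_paths:
--         if '/' in path or '\\' in path:
--             # Extract directory patterns
--             parts = path.replace('\\', '/').split('/')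
--             if len(parts) > 1:
--                 directory_structure[parts[0]] += 1
--                 if len(parts) > 2:
--                     directory_structure[f"{parts[0]}/{parts[1]}"] += 1
--
--     # Analyze naming patterns
--     entity_names = [e.get('name', '') for e in entities if e.get('name')]
--     naming_patterns = []
--
--     # Check for common patterns
--     if any('Service' in name for name in entity_names):
--         naming_patterns.append("Service layer pattern detected")
--     if any('Controller' in name for name in entity_names):
--         naming_patterns.append("Controller pattern (MVC/Web API)")
--     if any('Repository' in name or 'Dao' in name for name in entity_names):
--         naming_patterns.append("Repository/DAO pattern")
--     if any('Factory' in name for name in entity_names):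
--         naming_patterns.append("Factory pattern usage")
--     if any('Manager' in name for name in entity_names):
--         naming_patterns.append("Manager/Coordinator pattern")
--     if any('Handler' in name for name in entity_names):
--         naming_patterns.append("Handler/Command pattern")
--
--     # Analyze entity type distribution
--     type_counts = Counter(e.get('type', 'unknown') for e in entities)
--
--     # Build analysis result
--     analysis_parts = []
--
--     if directory_structure:
--         top_dirs = sorted(directory_structure.items(), key=lambda x: x[1], reverse=True)[:5]
--         dir_analysis = "**Directory Organization**:\n" + "\n".join([f"- {dir}: {count} components" for dir, count in top_dirs])
--         analysis_parts.append(dir_analysis)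
--
--     if naming_patterns:
--         pattern_analysis = "**Detected Patterns**:\n" + "\n".join([f"- {pattern}" for pattern in naming_patterns])
--         analysis_parts.append(pattern_analysis)
--
--     type_analysis = "**Component Types**:\n" + "\n".join([f"- {type_}: {count}" for type_, count in type_counts.most_common()])
--     analysis_parts.append(type_analysis)
--
--     return "\n\n".join(analysis_parts)
-- ===== SOURCE B (Python) =====
-- def _analyze_architectural_patterns(entities):
--     """Single fused pass over entities; table-driven pattern messages and section assembly."""
--     if not entities:
--         return "No entities available for architectural analysis."
--
--     dir_counts = {}
--     svc = ctl = repo = fac = mgr = hnd = False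
--     type_counts = {}
--
--     for e in entities:
--         path = e.get('file_path', '')
--         if path and ('/' in path or '\\' in path):
--             parts = path.replace('\\', '/').split('/')
--             if len(parts) > 1:
--                 top = parts[0]
--                 dir_counts[top] = dir_counts.get(top, 0) + 1
--                 if len(parts) > 2:
--                     sub = f"{parts[0]}/{parts[1]}"
--                     dir_counts[sub] = dir_counts.get(sub, 0) + 1
--         name = e.get('name', '')
--         if name:
--             svc = svc or 'Service' in name
--             ctl = ctl or 'Controller' in name
--             repo = repo or 'Repository' in name or 'Dao' in name
--             fac = fac or 'Factory' in name
--             mgr = mgr or 'Manager' in name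
--             hnd = hnd or 'Handler' in name
--         t = e.get('type', 'unknown')
--         type_counts[t] = type_counts.get(t, 0) + 1
--
--     top_dirs = sorted(dir_counts.items(), key=lambda kv: kv[1], reverse=True)[:5]
--     dir_str = "**Directory Organization**:\n" + "\n".join(
--         f"- {d}: {c} components" for d, c in top_dirs)
--
--     messages = [m for flag, m in (
--         (svc, "Service layer pattern detected"),
--         (ctl, "Controller pattern (MVC/Web API)"),
--         (repo, "Repository/DAO pattern"),
--         (fac, "Factory pattern usage"),
--         (mgr, "Manager/Coordinator pattern"),
--         (hnd, "Handler/Command pattern")) if flag]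
--     pat_str = "**Detected Patterns**:\n" + "\n".join(f"- {m}" for m in messages)
--
--     type_str = "**Component Types**:\n" + "\n".join(
--         f"- {t}: {c}" for t, c in sorted(type_counts.items(), key=lambda kv: kv[1], reverse=True))
--
--     return "\n\n".join(s for keep, s in (
--         (bool(dir_counts), dir_str), (bool(messages), pat_str), (True, type_str)) if keep)
-- ===== Notes on version B (the rewrite author's own statement) =====
-- stated objective: alternative
-- what changed: B replaces A's three separate passes over entities (file_path comprehension + directory loop, name comprehension + six any() scans, type Counter) with one fused loop maintaining a directory-count dict, six boolean flags and a type-count dict, and assembles the pattern list and the final sections from tables instead of A's if/append chains.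
import Mathlib
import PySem

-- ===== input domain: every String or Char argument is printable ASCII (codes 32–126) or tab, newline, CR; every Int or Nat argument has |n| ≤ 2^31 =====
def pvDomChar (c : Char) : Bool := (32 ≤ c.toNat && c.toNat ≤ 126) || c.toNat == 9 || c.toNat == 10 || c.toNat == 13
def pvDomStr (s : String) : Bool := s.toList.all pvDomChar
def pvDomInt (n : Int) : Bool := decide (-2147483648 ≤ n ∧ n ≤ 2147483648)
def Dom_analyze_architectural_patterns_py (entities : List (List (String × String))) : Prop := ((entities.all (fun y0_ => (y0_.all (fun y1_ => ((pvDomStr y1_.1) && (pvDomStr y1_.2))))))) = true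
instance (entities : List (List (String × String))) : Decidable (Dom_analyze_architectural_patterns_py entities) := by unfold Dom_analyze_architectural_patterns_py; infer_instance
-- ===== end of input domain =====

-- B fuses A's three separate passes over `entities` into ONE loop carrying (dir dict, six flags, type dict)
-- and assembles the pattern list and the sections from tables instead of if/append chains (objective: alternative).

-- ===== PORT A =====
-- e.get(k, dflt) on a Python dict (association list, first match)
def pvGet (e : List (String × String)) (k dflt : String) : String :=
  (PySem.Dict.mk e).getD k dflt

-- the body of A's `for path in file_paths:` loop (defaultdict int: d[k] += 1 = modify k 0 (+1))
def pvDirStep (d : PySem.Dict String Int) (path : String) : PySem.Dict String Int :=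
  if PySem.Str.isIn "/" path || PySem.Str.isIn "\\" path then
    let parts := (PySem.Str.split? (PySem.Str.replace path "\\" "/") "/").getD []  -- sep "/" ≠ "": split? is some (exact)
    if parts.length > 1 then
      let d2 := d.modify (parts.getD 0 "") 0 (· + 1)
      if parts.length > 2 then
        d2.modify (parts.getD 0 "" ++ "/" ++ parts.getD 1 "") 0 (· + 1)
      else d2
    else d
  else d

-- literal port of A; most_common() is ported as its CPython definition, a stable sort by count descending;
-- xs[:5] on a list is List.take 5 (exact)
def analyze_architectural_patterns_py (entities : List (List (String × String))) : String :=
  if entities = [] then "No entities available for architectural analysis."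
  else
    let file_paths := (entities.map (fun e => pvGet e "file_path" "")).filter (fun p => p != "")
    let directory_structure := file_paths.foldl pvDirStep PySem.Dict.empty
    let entity_names := (entities.map (fun e => pvGet e "name" "")).filter (fun p => p != "")
    let naming_patterns : List String := []
    let naming_patterns := if entity_names.any (fun n => PySem.Str.isIn "Service" n) then naming_patterns ++ ["Service layer pattern detected"] else naming_patterns
    let naming_patterns := if entity_names.any (fun n => PySem.Str.isIn "Controller" n) then naming_patterns ++ ["Controller pattern (MVC/Web API)"] else naming_patterns
    let naming_patterns := if entity_names.any (fun n => PySem.Str.isIn "Repository" n || PySem.Str.isIn "Dao" n) then naming_patterns ++ ["Repository/DAO pattern"] else naming_patterns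
    let naming_patterns := if entity_names.any (fun n => PySem.Str.isIn "Factory" n) then naming_patterns ++ ["Factory pattern usage"] else naming_patterns
    let naming_patterns := if entity_names.any (fun n => PySem.Str.isIn "Manager" n) then naming_patterns ++ ["Manager/Coordinator pattern"] else naming_patterns
    let naming_patterns := if entity_names.any (fun n => PySem.Str.isIn "Handler" n) then naming_patterns ++ ["Handler/Command pattern"] else naming_patterns
    let type_counts := PySem.Dict.counter (entities.map (fun e => pvGet e "type" "unknown"))
    let analysis_parts : List String := []
    let analysis_parts :=
      if directory_structure.items ≠ [] then
        let top_dirs := (PySem.List.sorted directory_structure.items (fun x => x.2) true).take 5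
        analysis_parts ++ ["**Directory Organization**:\n" ++ PySem.Str.join "\n" (top_dirs.map (fun p => "- " ++ p.1 ++ ": " ++ PySem.Int.toStr p.2 ++ " components"))]
      else analysis_parts
    let analysis_parts :=
      if naming_patterns ≠ [] then
        analysis_parts ++ ["**Detected Patterns**:\n" ++ PySem.Str.join "\n" (naming_patterns.map (fun p => "- " ++ p))]
      else analysis_parts
    let analysis_parts := analysis_parts ++ ["**Component Types**:\n" ++ PySem.Str.join "\n" ((PySem.List.sorted type_counts.items (fun x => x.2) true).map (fun p => "- " ++ p.1 ++ ": " ++ PySem.Int.toStr p.2))]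
    PySem.Str.join "\n\n" analysis_parts

-- ===== PORT B =====
-- B's in-loop directory update (plain dict: d[k] = d.get(k, 0) + 1)
def pvBDir (d : PySem.Dict String Int) (path : String) : PySem.Dict String Int :=
  if path != "" && (PySem.Str.isIn "/" path || PySem.Str.isIn "\\" path) then
    let parts := (PySem.Str.split? (PySem.Str.replace path "\\" "/") "/").getD []  -- sep "/" ≠ "": split? is some (exact)
    if parts.length > 1 then
      let top := parts.getD 0 ""
      let d2 := d.insert top (d.getD top 0 + 1)
      if parts.length > 2 then
        let sub := parts.getD 0 "" ++ "/" ++ parts.getD 1 ""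
        d2.insert sub (d2.getD sub 0 + 1)
      else d2
    else d
  else d

-- B's in-loop flag update (six booleans)
def pvBFlags (fl : Bool × Bool × Bool × Bool × Bool × Bool) (name : String) :
    Bool × Bool × Bool × Bool × Bool × Bool :=
  if name != "" then
    (fl.1 || PySem.Str.isIn "Service" name,
     fl.2.1 || PySem.Str.isIn "Controller" name,
     fl.2.2.1 || (PySem.Str.isIn "Repository" name || PySem.Str.isIn "Dao" name),
     fl.2.2.2.1 || PySem.Str.isIn "Factory" name,
     fl.2.2.2.2.1 || PySem.Str.isIn "Manager" name,
     fl.2.2.2.2.2 || PySem.Str.isIn "Handler" name)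
  else fl

-- the body of B's single fused loop
def pvBStep (st : PySem.Dict String Int × (Bool × Bool × Bool × Bool × Bool × Bool) × PySem.Dict String Int)
    (e : List (String × String)) :
    PySem.Dict String Int × (Bool × Bool × Bool × Bool × Bool × Bool) × PySem.Dict String Int :=
  (pvBDir st.1 (pvGet e "file_path" ""),
   pvBFlags st.2.1 (pvGet e "name" ""),
   let t := pvGet e "type" "unknown"
   st.2.2.insert t (st.2.2.getD t 0 + 1))

def analyze_architectural_patterns_py_alt (entities : List (List (String × String))) : String :=
  if entities = [] then "No entities available for architectural analysis."
  else
    let st := entities.foldl pvBStep (PySem.Dict.empty, (false, false, false, false, false, false), PySem.Dict.empty)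
    let ds := st.1
    let fl := st.2.1
    let tc := st.2.2
    let top_dirs := (PySem.List.sorted ds.items (fun x => x.2) true).take 5
    let dir_str := "**Directory Organization**:\n" ++ PySem.Str.join "\n" (top_dirs.map (fun p => "- " ++ p.1 ++ ": " ++ PySem.Int.toStr p.2 ++ " components"))
    let messages :=
      (([(fl.1, "Service layer pattern detected"),
         (fl.2.1, "Controller pattern (MVC/Web API)"),
         (fl.2.2.1, "Repository/DAO pattern"),
         (fl.2.2.2.1, "Factory pattern usage"),
         (fl.2.2.2.2.1, "Manager/Coordinator pattern"),
         (fl.2.2.2.2.2, "Handler/Command pattern")] : List (Bool × String)).filter (·.1)).map (·.2)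
    let pat_str := "**Detected Patterns**:\n" ++ PySem.Str.join "\n" (messages.map (fun m => "- " ++ m))
    let type_str := "**Component Types**:\n" ++ PySem.Str.join "\n" ((PySem.List.sorted tc.items (fun x => x.2) true).map (fun p => "- " ++ p.1 ++ ": " ++ PySem.Int.toStr p.2))
    PySem.Str.join "\n\n"
      ((([(decide (ds.items ≠ []), dir_str),
          (decide (messages ≠ []), pat_str),
          (true, type_str)] : List (Bool × String)).filter (·.1)).map (·.2))

-- ===== PRECONDITION & SPEC =====
def Spec_analyze_architectural_patterns_py (entities : List (List (String × String))) (out : String) : Prop := out = analyze_architectural_patterns_py_alt entities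
instance (entities : List (List (String × String))) (out : String) : Decidable (Spec_analyze_architectural_patterns_py entities out) := by unfold Spec_analyze_architectural_patterns_py; infer_instance

-- ===== CLAIM (what is proved, stated in full; the proofs are below) =====
def Claim_equal_analyze_architectural_patterns_py : Prop := ∀ (entities : List (List (String × String))), Dom_analyze_architectural_patterns_py entities → Spec_analyze_architectural_patterns_py entities (analyze_architectural_patterns_py entities)

-- ===== LEMMAS AND PROOFS =====

-- A's three intermediate lists
def pvPaths (es : List (List (String × String))) : List String :=
  (es.map (fun e => pvGet e "file_path" "")).filter (fun p => p != "")
def pvNames (es : List (List (String × String))) : List String :=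
  (es.map (fun e => pvGet e "name" "")).filter (fun p => p != "")
def pvTypes (es : List (List (String × String))) : List String :=
  es.map (fun e => pvGet e "type" "unknown")

lemma pvBDir_empty (d : PySem.Dict String Int) : pvBDir d "" = d := by
  simp [pvBDir]

lemma pvBDir_of_ne (d : PySem.Dict String Int) (path : String) (h : ¬ path = "") :
    pvBDir d path = pvDirStep d path := by
  have hb : (path != "") = true := by simp [h]
  simp only [pvBDir, pvDirStep, hb, Bool.true_and, PySem.Dict.modify]

-- the fused loop computes exactly A's three folds
lemma pvLoop (es : List (List (String × String)))
    (ds : PySem.Dict String Int) (fl : Bool × Bool × Bool × Bool × Bool × Bool)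
    (tc : PySem.Dict String Int) :
    es.foldl pvBStep (ds, fl, tc) =
      ((pvPaths es).foldl pvDirStep ds,
       (fl.1 || (pvNames es).any (fun n => PySem.Str.isIn "Service" n),
        fl.2.1 || (pvNames es).any (fun n => PySem.Str.isIn "Controller" n),
        fl.2.2.1 || (pvNames es).any (fun n => PySem.Str.isIn "Repository" n || PySem.Str.isIn "Dao" n),
        fl.2.2.2.1 || (pvNames es).any (fun n => PySem.Str.isIn "Factory" n),
        fl.2.2.2.2.1 || (pvNames es).any (fun n => PySem.Str.isIn "Manager" n),
        fl.2.2.2.2.2 || (pvNames es).any (fun n => PySem.Str.isIn "Handler" n)),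
       (pvTypes es).foldl (fun d t => d.modify t 0 (· + 1)) tc) := by
  induction es generalizing ds fl tc with
  | nil => simp [pvPaths, pvNames, pvTypes]
  | cons e es ih =>
    simp only [List.foldl_cons, pvBStep, ih]
    by_cases hp : pvGet e "file_path" "" = "" <;> by_cases hn : pvGet e "name" "" = ""
    · simp [pvPaths, pvNames, pvTypes, pvBFlags, hp, hn, pvBDir_empty, PySem.Dict.modify]
    · simp [pvPaths, pvNames, pvTypes, pvBFlags, hp, hn, pvBDir_empty, Bool.or_assoc, PySem.Dict.modify]
    · simp [pvPaths, pvNames, pvTypes, pvBFlags, hp, hn, pvBDir_of_ne _ _ hp, PySem.Dict.modify]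
    · simp [pvPaths, pvNames, pvTypes, pvBFlags, hp, hn, pvBDir_of_ne _ _ hp, Bool.or_assoc, PySem.Dict.modify]

-- the six-flag table produces exactly A's append chain
lemma pvMessages_eq (c1 c2 c3 c4 c5 c6 : Bool) :
    ((([(c1, "Service layer pattern detected"),
        (c2, "Controller pattern (MVC/Web API)"),
        (c3, "Repository/DAO pattern"),
        (c4, "Factory pattern usage"),
        (c5, "Manager/Coordinator pattern"),
        (c6, "Handler/Command pattern")] : List (Bool × String)).filter (·.1)).map (·.2)) =
      (let l0 : List String := []
       let l1 := if c1 = true then l0 ++ ["Service layer pattern detected"] else l0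
       let l2 := if c2 = true then l1 ++ ["Controller pattern (MVC/Web API)"] else l1
       let l3 := if c3 = true then l2 ++ ["Repository/DAO pattern"] else l2
       let l4 := if c4 = true then l3 ++ ["Factory pattern usage"] else l3
       let l5 := if c5 = true then l4 ++ ["Manager/Coordinator pattern"] else l4
       if c6 = true then l5 ++ ["Handler/Command pattern"] else l5) := by
  cases c1 <;> cases c2 <;> cases c3 <;> cases c4 <;> cases c5 <;> cases c6 <;> rfl

-- the two-entry section table produces exactly A's conditional append chain
lemma pvAssemble_eq (p1 p2 : Prop) [Decidable p1] [Decidable p2] (s1 s2 s3 : String) :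
    ((([(decide p1, s1), (decide p2, s2), (true, s3)] : List (Bool × String)).filter (·.1)).map (·.2)) =
      (if p2 then (if p1 then ([] : List String) ++ [s1] else []) ++ [s2]
       else (if p1 then ([] : List String) ++ [s1] else [])) ++ [s3] := by
  by_cases h1 : p1 <;> by_cases h2 : p2 <;> simp [h1, h2]

-- ===== VERDICT (by name: the statement is the Claim_ definition above) =====
theorem analyze_architectural_patterns_py_spec : Claim_equal_analyze_architectural_patterns_py := by
  intro entities _hdom
  unfold Spec_analyze_architectural_patterns_py
  by_cases hnil : entities = []
  · subst hnil; rfl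
  · unfold analyze_architectural_patterns_py analyze_architectural_patterns_py_alt
    rw [if_neg hnil, if_neg hnil]
    rw [pvLoop]
    simp only [Bool.false_or, pvPaths, pvNames, pvTypes, PySem.Dict.counter_eq_foldl,
      pvMessages_eq, pvAssemble_eq]
    rfl
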